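-- pv_equiv track=rewrite | github.com/yangtzehina/auto-skills-loop | src/openclaw_skill_create/services/expert_skill_studio.py | _ordered_sections
-- ===== SOURCE A (Python) =====
-- def _ordered_sections(base_order: list[str], preferred_tail: list[str]) -> list[str]:
--     head = [item for item in base_order if item not in {
--         "Output Format",
--         "Decision Rules",
--         "Cut Rules",
--         "Quality Checks",
--         "Failure Patterns and Fixes",
--         "Worked Micro-Example",
--         "Voice Rules",
--     }]
--     tail = [item for item in preferred_tail if item in base_order]
--     for item in base_order:
--         if item not in head and item not in tail:
--             tail.append(item)
--     ordered: list[str] = []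
--     for item in head + tail:
--         if item not in ordered:
--             ordered.append(item)
--     return ordered
-- ===== SOURCE B (Python) =====
-- _SPECIAL = {
--     "Output Format",
--     "Decision Rules",
--     "Cut Rules",
--     "Quality Checks",
--     "Failure Patterns and Fixes",
--     "Worked Micro-Example",
--     "Voice Rules",
-- }
--
--
-- def _ordered_sections(base_order: list[str], preferred_tail: list[str]) -> list[str]:
--     base_index = {}
--     for i, x in enumerate(base_order):
--         base_index.setdefault(x, i)
--     pref_index = {}
--     for i, x in enumerate(preferred_tail):
--         pref_index.setdefault(x, i)
--     n = len(base_order)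
--     m = len(preferred_tail)
--
--     def rank(x: str) -> int:
--         if x not in _SPECIAL:
--             return base_index[x]
--         if x in pref_index:
--             return n + pref_index[x]
--         return n + m + base_index[x]
--
--     return sorted(dict.fromkeys(base_order), key=rank)
-- ===== Notes on version B (the rewrite author's own statement) =====
-- stated objective: faster
-- what changed: B replaces A's staged list building (head list, mutated tail list with repeated list-membership scans, final dedup pass) by computing two first-occurrence index tables and one integer rank per name, then emitting the order as a single sorted(dict.fromkeys(base_order), key=rank).
import Mathlib
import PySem

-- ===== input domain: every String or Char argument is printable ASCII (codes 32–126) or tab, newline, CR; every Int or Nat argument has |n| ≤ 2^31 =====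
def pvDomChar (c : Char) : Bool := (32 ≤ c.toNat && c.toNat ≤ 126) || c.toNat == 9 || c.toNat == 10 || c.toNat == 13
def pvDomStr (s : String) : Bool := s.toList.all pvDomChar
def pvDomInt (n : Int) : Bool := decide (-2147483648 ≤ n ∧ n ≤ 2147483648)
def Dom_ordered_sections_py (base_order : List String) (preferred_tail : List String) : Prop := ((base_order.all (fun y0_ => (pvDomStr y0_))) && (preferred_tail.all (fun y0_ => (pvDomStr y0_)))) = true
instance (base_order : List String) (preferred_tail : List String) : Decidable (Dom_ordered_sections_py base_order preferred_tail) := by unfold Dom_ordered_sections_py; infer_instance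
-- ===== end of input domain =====

-- B replaces A's staged list building (head list, mutated tail list, final dedup pass)
-- by first-occurrence index tables and one integer rank per name, emitted by a single
-- sorted(dict.fromkeys(base_order), key=rank) (objective: faster, as measured).

-- the special section names (A's inline set literal, B's module-level _SPECIAL)
def pvSpecials : List String :=
  ["Output Format", "Decision Rules", "Cut Rules", "Quality Checks",
   "Failure Patterns and Fixes", "Worked Micro-Example", "Voice Rules"]

-- ===== PORT A =====
def ordered_sections_py (base_order : List String) (preferred_tail : List String) : List String :=
  -- head = [item for item in base_order if item not in {…}]
  let head := base_order.filter (fun item => !(pvSpecials.contains item))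
  -- tail = [item for item in preferred_tail if item in base_order]
  let tail0 := preferred_tail.filter (fun item => base_order.contains item)
  -- for item in base_order: if item not in head and item not in tail: tail.append(item)
  let tail := base_order.foldl
    (fun t item => if !(head.contains item) && !(t.contains item) then t ++ [item] else t) tail0
  -- ordered = []; for item in head + tail: if item not in ordered: ordered.append(item)
  (head ++ tail).foldl (fun o item => if !(o.contains item) then o ++ [item] else o) []

-- ===== PORT B =====
def ordered_sections_py_alt (base_order : List String) (preferred_tail : List String) : List String :=
  -- base_index = {}; for i, x in enumerate(base_order): base_index.setdefault(x, i)
  let base_index := (PySem.List.enumerate base_order 0).foldl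
    (fun d p => d.setdefault p.2 p.1) PySem.Dict.empty
  -- pref_index = {}; for i, x in enumerate(preferred_tail): pref_index.setdefault(x, i)
  let pref_index := (PySem.List.enumerate preferred_tail 0).foldl
    (fun d p => d.setdefault p.2 p.1) PySem.Dict.empty
  let n : Int := base_order.length
  let m : Int := preferred_tail.length
  -- def rank(x): …  — Python's d[x] would raise KeyError on a missing key; rank is only
  -- applied to members of base_order, where the looked-up key is always present, so the
  -- getD default 0 is never used
  let rank : String → Int := fun x =>
    if !(pvSpecials.contains x) then base_index.getD x 0
    else if pref_index.contains x then n + pref_index.getD x 0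
    else n + m + base_index.getD x 0
  -- return sorted(dict.fromkeys(base_order), key=rank)
  PySem.List.sorted (PySem.List.dedup base_order) rank

-- ===== PRECONDITION & SPEC =====
def Spec_ordered_sections_py (base_order : List String) (preferred_tail : List String) (out : List String) : Prop := out = ordered_sections_py_alt base_order preferred_tail
instance (base_order : List String) (preferred_tail : List String) (out : List String) : Decidable (Spec_ordered_sections_py base_order preferred_tail out) := by unfold Spec_ordered_sections_py; infer_instance

-- ===== CLAIM (what is proved, stated in full; the proofs are below) =====
def Claim_equal_ordered_sections_py : Prop := ∀ (base_order : List String) (preferred_tail : List String), Dom_ordered_sections_py base_order preferred_tail → Spec_ordered_sections_py base_order preferred_tail (ordered_sections_py base_order preferred_tail)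

-- ===== LEMMAS AND PROOFS =====

-- the dedup-append loop with accumulator acc
def pvD (acc : List String) (l : List String) : List String :=
  l.foldl (fun o x => if !(o.contains x) then o ++ [x] else o) acc

-- keep-first deduplication, recursively
def dedupF : List String → List String
  | [] => []
  | x :: t => x :: dedupF (t.filter (fun y => !(y == x)))
termination_by l => l.length
decreasing_by
  simp only [List.length_cons, Nat.lt_succ_iff]
  simpa using List.length_filter_le _ t.attach

theorem pvD_cons (acc : List String) (x : String) (l : List String) :
    pvD acc (x :: l) = pvD (if !(acc.contains x) then acc ++ [x] else acc) l := rfl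

theorem pvD_append (acc l₁ l₂ : List String) :
    pvD acc (l₁ ++ l₂) = pvD (pvD acc l₁) l₂ := by
  simp [pvD, List.foldl_append]

theorem mem_dedupF_aux (n : Nat) : ∀ (l : List String), l.length ≤ n → ∀ x, (x ∈ dedupF l ↔ x ∈ l) := by
  induction n with
  | zero =>
    intro l hl x
    cases l with
    | nil => simp [dedupF]
    | cons y t => simp at hl
  | succ n ih =>
    intro l hl x
    cases l with
    | nil => simp [dedupF]
    | cons y t =>
      rw [dedupF]
      have hlen : (t.filter (fun a => !(a == y))).length ≤ n :=
        le_trans (List.length_filter_le _ t) (by simpa using hl)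
      by_cases hxy : x = y <;> simp [ih _ hlen, hxy]

theorem mem_dedupF (l : List String) (x : String) : x ∈ dedupF l ↔ x ∈ l :=
  mem_dedupF_aux l.length l le_rfl x

-- pull the accumulator out of the dedup loop
theorem pvD_acc (l acc : List String) :
    pvD acc l = acc ++ dedupF (l.filter (fun x => !(acc.contains x))) := by
  induction l generalizing acc with
  | nil => simp [pvD, dedupF]
  | cons y t ih =>
    rw [pvD_cons]
    by_cases h : acc.contains y
    · rw [if_neg (by simpa using h), ih, List.filter_cons, if_neg (by simpa using h)]
    · rw [if_pos (by simpa using h), ih (acc ++ [y]), List.filter_cons, if_pos (by simpa using h),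
        dedupF, List.append_assoc, List.filter_filter, List.singleton_append]
      congr 3
      apply List.filter_congr
      intro x _
      cases hc : acc.contains x <;> cases hxy : x == y <;> simp_all [List.contains_append]

theorem pvD_nil_eq (l : List String) : pvD [] l = dedupF l := by
  rw [pvD_acc]; simp

theorem nodup_dedupF_aux (n : Nat) : ∀ (l : List String), l.length ≤ n → (dedupF l).Nodup := by
  induction n with
  | zero =>
    intro l hl
    cases l with
    | nil => simp [dedupF]
    | cons y t => simp at hl
  | succ n ih =>
    intro l hl
    cases l with
    | nil => simp [dedupF]
    | cons y t =>
      have hlen : (t.filter (fun a => !(a == y))).length ≤ n :=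
        le_trans (List.length_filter_le _ t) (by simpa using hl)
      rw [dedupF]
      refine List.nodup_cons.mpr ⟨?_, ih _ hlen⟩
      rw [mem_dedupF]
      simp

theorem nodup_dedupF (l : List String) : (dedupF l).Nodup :=
  nodup_dedupF_aux l.length l le_rfl

theorem contains_append_or (a b : List String) (x : String) :
    (a ++ b).contains x = (a.contains x || b.contains x) := by
  by_cases h : x ∈ a <;> by_cases h2 : x ∈ b <;>
    simp [List.contains_iff_mem, h, h2]

theorem filter_dedupF_aux (n : Nat) : ∀ (l : List String), l.length ≤ n → ∀ (p : String → Bool),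
    (dedupF l).filter p = dedupF (l.filter p) := by
  induction n with
  | zero =>
    intro l hl p
    cases l with
    | nil => simp [dedupF]
    | cons y t => simp at hl
  | succ n ih =>
    intro l hl p
    cases l with
    | nil => simp [dedupF]
    | cons y t =>
      have hlen : (t.filter (fun a => !(a == y))).length ≤ n :=
        le_trans (List.length_filter_le _ t) (by simpa using hl)
      rw [dedupF, List.filter_cons, List.filter_cons]
      by_cases hp : p y
      · rw [if_pos (by simp [hp]), if_pos (by simp [hp]), dedupF, ih _ hlen,
          List.filter_filter, List.filter_filter]
        congr 2
        apply List.filter_congr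
        intro x _
        rw [Bool.and_comm]
      · rw [if_neg (by simp [hp]), if_neg (by simp [hp]), ih _ hlen, List.filter_filter]
        congr 1
        apply List.filter_congr
        intro x _
        cases hpx : p x
        · simp
        · cases hxy : x == y
          · simp [hxy]
          · have hxey : x = y := by simpa using hxy
            rw [hxey] at hpx
            exact absurd hpx hp

theorem filter_dedupF (p : String → Bool) (l : List String) :
    (dedupF l).filter p = dedupF (l.filter p) :=
  filter_dedupF_aux l.length l le_rfl p

theorem dedupF_of_nodup_aux (n : Nat) : ∀ (l : List String), l.length ≤ n → l.Nodup →
    dedupF l = l := by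
  induction n with
  | zero =>
    intro l hl _
    cases l with
    | nil => simp [dedupF]
    | cons y t => simp at hl
  | succ n ih =>
    intro l hl hnd
    cases l with
    | nil => simp [dedupF]
    | cons y t =>
      rcases List.nodup_cons.mp hnd with ⟨hy, ht⟩
      have hft : t.filter (fun a => !(a == y)) = t := by
        apply List.filter_eq_self.mpr
        intro x hx
        simp only [Bool.not_eq_eq_eq_not, Bool.not_true, beq_eq_false_iff_ne]
        exact fun hxy => hy (hxy ▸ hx)
      rw [dedupF, hft, ih t (by simpa using hl) ht]

theorem dedupF_of_nodup (l : List String) (h : l.Nodup) : dedupF l = l :=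
  dedupF_of_nodup_aux l.length l le_rfl h

theorem dedupF_idem (l : List String) : dedupF (dedupF l) = dedupF l :=
  dedupF_of_nodup _ (nodup_dedupF l)

-- A's result, as the three deduplicated groups
theorem a_side (sp : String → Bool) (base pref : List String) :
    pvD []
        ((base.filter fun x => !(sp x)) ++
          base.foldl (fun t x =>
            if !((base.filter fun y => !(sp y)).contains x) && !(t.contains x)
            then t ++ [x] else t)
            (pref.filter fun x => base.contains x))
      = dedupF (base.filter fun x => !(sp x))
        ++ dedupF (pref.filter fun x => base.contains x && sp x)
        ++ dedupF (base.filter fun x =>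
             sp x && !((dedupF (pref.filter fun y => base.contains y && sp y)).contains x)) := by
  set hd := base.filter (fun x => !(sp x)) with hhd
  set t0 := pref.filter (fun x => base.contains x) with ht0
  set P := pref.filter (fun x => base.contains x && sp x) with hP
  set NS := dedupF hd with hNS
  set SP := dedupF P with hSP
  -- membership facts
  have hmemNS : ∀ x, NS.contains x = (base.contains x && !(sp x)) := by
    intro x
    by_cases hb : x ∈ base <;> cases hs : sp x <;>
      simp [hNS, hhd, List.contains_iff_mem, mem_dedupF, List.mem_filter, hb, hs]
  have hmemt0 : ∀ x, t0.contains x = (pref.contains x && base.contains x) := by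
    intro x
    by_cases hb : x ∈ base <;> by_cases hp : x ∈ pref <;>
      simp [ht0, List.contains_iff_mem, List.mem_filter, hb, hp]
  have hmemSP : ∀ x, SP.contains x = P.contains x := by
    intro x
    simp [hSP, List.contains_iff_mem, mem_dedupF]
  -- the tail-building loop is the dedup loop over the special items of base_order
  have htail : base.foldl (fun t x =>
      if !(hd.contains x) && !(t.contains x) then t ++ [x] else t) t0
      = pvD t0 (base.filter sp) := by
    rw [PySem.List.foldl_congr_mem base _
      (fun t x => if sp x then (if !(t.contains x) then t ++ [x] else t) else t) t0 ?_]
    · rw [PySem.List.foldl_if_eq_foldl_filter sp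
        (fun t x => if !(t.contains x) then t ++ [x] else t) base t0]
      rfl
    · intro acc x hx
      have hhdx : (!(hd.contains x)) = sp x := by
        cases hs : sp x <;>
          simp [hhd, List.contains_iff_mem, List.mem_filter, hx, hs]
      rw [hhdx]
      cases hs : sp x <;> simp [hs]
  rw [htail, pvD_append, pvD_nil_eq, ← hNS, pvD_acc (base.filter sp) t0, pvD_append,
    pvD_acc t0 NS]
  -- preferred-tail survivors of head-dedup are exactly the special preferred items P
  have hC1 : t0.filter (fun x => !(NS.contains x)) = P := by
    rw [ht0, List.filter_filter, hP]
    apply List.filter_congr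
    intro x _
    rw [hmemNS]
    cases hb : base.contains x <;> cases hs : sp x <;> simp [hb, hs]
  rw [hC1, ← hSP, pvD_acc _ (NS ++ SP), filter_dedupF, dedupF_idem]
  -- remaining-specials filter
  have hC2 : (((base.filter sp).filter (fun x => !(t0.contains x))).filter
        (fun x => !((NS ++ SP).contains x)))
      = base.filter (fun x => sp x && !(SP.contains x)) := by
    rw [List.filter_filter, List.filter_filter]
    apply List.filter_congr
    intro x hx
    have hbc : base.contains x = true := List.contains_iff_mem.mpr hx
    rw [contains_append_or, hmemNS, hmemt0, hbc]
    cases hs : sp x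
    · simp
    · cases hSPc : SP.contains x
      · have hprefc : pref.contains x = false := by
          cases hpc : pref.contains x
          · rfl
          · exfalso
            have hxP : x ∈ P := by
              rw [hP]
              exact List.mem_filter.mpr ⟨List.contains_iff_mem.mp hpc,
                by simp [List.contains_iff_mem, hx, hs]⟩
            rw [hmemSP, List.contains_iff_mem.mpr hxP] at hSPc
            exact Bool.true_eq_false.mp hSPc
        rw [hprefc]
        simp
      · simp
  rw [hC2]

-- ---- B side: the index dictionaries and the rank function ----

def pvIdx (l : List String) : PySem.Dict String Int :=
  (PySem.List.enumerate l 0).foldl (fun d p => d.setdefault p.2 p.1) PySem.Dict.empty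

def pvRank (base pref : List String) (x : String) : Int :=
  if !(pvSpecials.contains x) then (pvIdx base).getD x 0
  else if (pvIdx pref).contains x then (base.length : Int) + (pvIdx pref).getD x 0
  else (base.length : Int) + (pref.length : Int) + (pvIdx base).getD x 0

theorem alt_eq_sorted (base pref : List String) :
    ordered_sections_py_alt base pref
      = PySem.List.sorted (PySem.List.dedup base) (pvRank base pref) := rfl

-- the setdefault loop builds the first-occurrence index table
theorem pvIdx_fold_get? (x : String) : ∀ (l : List String) (s : Int) (d : PySem.Dict String Int),
    (((PySem.List.enumerate l s).foldl (fun d p => d.setdefault p.2 p.1) d).get? x)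
      = if d.contains x then d.get? x
        else if x ∈ l then some (s + (l.idxOf x : Int)) else none := by
  intro l
  induction l with
  | nil =>
    intro s d
    cases hc : d.contains x
    · have hg : d.get? x = none := by
        rw [PySem.Dict.contains_eq_isSome_get?] at hc
        exact Option.not_isSome_iff_eq_none.mp (by simp [hc])
      simp [PySem.List.enumerate, hc, hg]
    · simp [PySem.List.enumerate, hc]
  | cons y t ih =>
    intro s d
    rw [PySem.List.enumerate_cons, List.foldl_cons]
    rw [ih (s + 1) (d.setdefault y s)]
    by_cases hxy : x = y
    · subst hxy
      have hcs : (d.setdefault x s).contains x = true := by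
        rw [PySem.Dict.contains_setdefault]; simp
      rw [if_pos hcs, PySem.Dict.get?_setdefault_self]
      by_cases hc : d.contains x = true
      · rw [if_pos hc]
        rw [PySem.Dict.contains_eq_isSome_get?] at hc
        rcases Option.isSome_iff_exists.mp hc with ⟨w, hw⟩
        simp [hw]
      · have hg : d.get? x = none := by
          rw [PySem.Dict.contains_eq_isSome_get?] at hc
          exact Option.not_isSome_iff_eq_none.mp (by simpa using hc)
        rw [if_neg hc, if_pos (List.mem_cons_self)]
        simp [hg, List.idxOf_cons_self]
    · have hcs : (d.setdefault y s).contains x = d.contains x := by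
        rw [PySem.Dict.contains_setdefault]
        simp [show (x == y) = false from beq_eq_false_iff_ne.mpr hxy]
      have hgs : (d.setdefault y s).get? x = d.get? x :=
        PySem.Dict.get?_setdefault_of_ne _ _ hxy
      rw [hcs, hgs]
      have hmem : (x ∈ y :: t) ↔ (x ∈ t) := by simp [hxy]
      by_cases hc : d.contains x = true
      · rw [if_pos hc, if_pos hc]
      · rw [if_neg hc, if_neg hc]
        by_cases hm : x ∈ t
        · rw [if_pos hm, if_pos (hmem.mpr hm), List.idxOf_cons_ne t (Ne.symm hxy)]
          push_cast
          congr 1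
          ring
        · rw [if_neg hm, if_neg (fun h => hm (hmem.mp h))]

theorem pvIdx_get? (l : List String) (x : String) :
    (pvIdx l).get? x = if x ∈ l then some ((l.idxOf x : Int)) else none := by
  rw [pvIdx, pvIdx_fold_get? x l 0 PySem.Dict.empty]
  simp [PySem.Dict.contains_empty]

theorem pvIdx_getD (l : List String) (x : String) (h : x ∈ l) :
    (pvIdx l).getD x 0 = (l.idxOf x : Int) := by
  rw [PySem.Dict.getD_eq_get?_getD, pvIdx_get?, if_pos h]; rfl

theorem pvIdx_contains (l : List String) (x : String) :
    (pvIdx l).contains x = decide (x ∈ l) := by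
  rw [PySem.Dict.contains_eq_isSome_get?, pvIdx_get?]
  by_cases h : x ∈ l <;> simp [h]

-- rank on the three groups
theorem pvRank_nonspecial (base pref : List String) (x : String) (hx : x ∈ base)
    (hs : pvSpecials.contains x = false) :
    pvRank base pref x = (base.idxOf x : Int) := by
  rw [pvRank, if_pos (by simpa using hs), pvIdx_getD base x hx]

theorem pvRank_special_pref (base pref : List String) (x : String) (hp : x ∈ pref)
    (hs : pvSpecials.contains x = true) :
    pvRank base pref x = (base.length : Int) + (pref.idxOf x : Int) := by
  rw [pvRank, if_neg (by simpa using hs), if_pos (by simp [pvIdx_contains, hp]),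
    pvIdx_getD pref x hp]

theorem pvRank_special_rest (base pref : List String) (x : String) (hx : x ∈ base)
    (hp : x ∉ pref) (hs : pvSpecials.contains x = true) :
    pvRank base pref x = (base.length : Int) + (pref.length : Int) + (base.idxOf x : Int) := by
  rw [pvRank, if_neg (by simpa using hs), if_neg (by simp [pvIdx_contains, hp]),
    pvIdx_getD base x hx]

-- index of a filtered list is monotone in the index of the original
theorem idx_filter_mono (p : String → Bool) : ∀ (l : List String) (y z : String),
    y ∈ l.filter p → z ∈ l.filter p →
    (l.filter p).idxOf y < (l.filter p).idxOf z → l.idxOf y < l.idxOf z := by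
  intro l
  induction l with
  | nil => intro y z hy; simp at hy
  | cons a t ih =>
    intro y z hy hz hlt
    by_cases hpa : p a = true
    · rw [List.filter_cons_of_pos hpa] at hy hz hlt
      by_cases hya : y = a
      · subst hya
        rw [List.idxOf_cons_self] at hlt ⊢
        have hza : z ≠ y := by
          intro h; rw [h, List.idxOf_cons_self] at hlt; omega
        rw [List.idxOf_cons_ne t (Ne.symm hza)]
        omega
      · have hza : z ≠ a := by
          intro h
          rw [h, List.idxOf_cons_self, List.idxOf_cons_ne _ (Ne.symm hya)] at hlt
          omega
        rw [List.idxOf_cons_ne _ (Ne.symm hya), List.idxOf_cons_ne _ (Ne.symm hza)] at hlt ⊢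
        have := ih y z (by simpa [hya] using hy) (by simpa [hza] using hz) (by omega)
        omega
    · have hpa' : p a = false := by simpa using hpa
      rw [List.filter_cons_of_neg (by simp [hpa'])] at hy hz hlt
      have hya : y ≠ a := by
        intro h; subst h
        have := (List.mem_filter.mp hy).2; simp [hpa'] at this
      have hza : z ≠ a := by
        intro h; subst h
        have := (List.mem_filter.mp hz).2; simp [hpa'] at this
      rw [List.idxOf_cons_ne _ (Ne.symm hya), List.idxOf_cons_ne _ (Ne.symm hza)]
      have := ih y z hy hz hlt
      omega

-- first-occurrence dedup lists its elements in order of first occurrence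
theorem dedupF_pairwise_idx_aux (n : Nat) : ∀ (l : List String), l.length ≤ n →
    (dedupF l).Pairwise (fun a b => l.idxOf a < l.idxOf b) := by
  induction n with
  | zero =>
    intro l hl
    cases l with
    | nil => simp [dedupF]
    | cons y t => simp at hl
  | succ n ih =>
    intro l hl
    cases l with
    | nil => simp [dedupF]
    | cons x t =>
      have hlen : (t.filter (fun a => !(a == x))).length ≤ n :=
        le_trans (List.length_filter_le _ t) (by simpa using hl)
      rw [dedupF]
      refine List.pairwise_cons.mpr ⟨?_, ?_⟩
      · intro y hy
        have hyf : y ∈ t.filter (fun a => !(a == x)) := (mem_dedupF _ _).mp hy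
        have hyx : y ≠ x := by
          have := (List.mem_filter.mp hyf).2; simpa using this
        rw [List.idxOf_cons_self, List.idxOf_cons_ne _ (Ne.symm hyx)]
        omega
      · have hp := ih _ hlen
        refine hp.imp_of_mem ?_
        intro a b ha hb hab
        have haf : a ∈ t.filter (fun y => !(y == x)) := (mem_dedupF _ _).mp ha
        have hbf : b ∈ t.filter (fun y => !(y == x)) := (mem_dedupF _ _).mp hb
        have hax : a ≠ x := by have := (List.mem_filter.mp haf).2; simpa using this
        have hbx : b ≠ x := by have := (List.mem_filter.mp hbf).2; simpa using this
        have := idx_filter_mono _ t a b haf hbf hab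
        rw [List.idxOf_cons_ne _ (Ne.symm hax), List.idxOf_cons_ne _ (Ne.symm hbx)]
        omega

theorem dedupF_pairwise_idx (l : List String) :
    (dedupF l).Pairwise (fun a b => l.idxOf a < l.idxOf b) :=
  dedupF_pairwise_idx_aux l.length l le_rfl

theorem dedupF_filter_pairwise (l : List String) (p : String → Bool) :
    (dedupF (l.filter p)).Pairwise (fun a b => l.idxOf a < l.idxOf b) := by
  refine (dedupF_pairwise_idx (l.filter p)).imp_of_mem ?_
  intro a b ha hb hab
  exact idx_filter_mono p l a b ((mem_dedupF _ _).mp ha) ((mem_dedupF _ _).mp hb) hab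

-- B's sort returns exactly A's three groups
theorem b_side (base pref : List String) :
    ordered_sections_py_alt base pref
      = dedupF (base.filter fun x => !(pvSpecials.contains x))
        ++ dedupF (pref.filter fun x => base.contains x && pvSpecials.contains x)
        ++ dedupF (base.filter fun x =>
             pvSpecials.contains x
               && !((dedupF (pref.filter fun y =>
                      base.contains y && pvSpecials.contains y)).contains x)) := by
  rw [alt_eq_sorted]
  set NS := dedupF (base.filter fun x => !(pvSpecials.contains x)) with hNSdef
  set SP := dedupF (pref.filter fun x => base.contains x && pvSpecials.contains x) with hSPdef
  set SR := dedupF (base.filter fun x =>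
      pvSpecials.contains x && !(SP.contains x)) with hSRdef
  -- membership characterisations
  have hNS : ∀ x, x ∈ NS ↔ x ∈ base ∧ pvSpecials.contains x = false := by
    intro x
    rw [hNSdef, mem_dedupF, List.mem_filter]
    simp
  have hSP : ∀ x, x ∈ SP ↔ x ∈ pref ∧ x ∈ base ∧ pvSpecials.contains x = true := by
    intro x
    rw [hSPdef, mem_dedupF, List.mem_filter]
    simp [List.contains_iff_mem, and_assoc]
  have hSR : ∀ x, x ∈ SR ↔ x ∈ base ∧ pvSpecials.contains x = true ∧ x ∉ pref := by
    intro x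
    rw [hSRdef, mem_dedupF, List.mem_filter]
    constructor
    · rintro ⟨hb, hcond⟩
      rcases Bool.and_eq_true_iff.mp hcond with ⟨hs, hnsp⟩
      refine ⟨hb, hs, fun hp => ?_⟩
      have : x ∈ SP := (hSP x).mpr ⟨hp, hb, hs⟩
      rw [List.contains_iff_mem.mpr this] at hnsp
      simp at hnsp
    · rintro ⟨hb, hs, hp⟩
      refine ⟨hb, by
        rw [hs]
        have : x ∉ SP := fun h => hp ((hSP x).mp h).1
        simp [List.contains_iff_mem, this]⟩
  -- the rank of each group member
  have hrNS : ∀ a ∈ NS, pvRank base pref a = (base.idxOf a : Int) := fun a ha =>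
    pvRank_nonspecial base pref a ((hNS a).mp ha).1 ((hNS a).mp ha).2
  have hrSP : ∀ a ∈ SP, pvRank base pref a = (base.length : Int) + (pref.idxOf a : Int) :=
    fun a ha => pvRank_special_pref base pref a ((hSP a).mp ha).1 ((hSP a).mp ha).2.2
  have hrSR : ∀ a ∈ SR,
      pvRank base pref a = (base.length : Int) + (pref.length : Int) + (base.idxOf a : Int) :=
    fun a ha => pvRank_special_rest base pref a ((hSR a).mp ha).1 ((hSR a).mp ha).2.2
      ((hSR a).mp ha).2.1
  -- rank brackets of the three groups
  have hbNS : ∀ a ∈ NS, pvRank base pref a < (base.length : Int) := by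
    intro a ha
    rw [hrNS a ha]
    exact_mod_cast List.idxOf_lt_length_of_mem ((hNS a).mp ha).1
  have hbSP : ∀ a ∈ SP, (base.length : Int) ≤ pvRank base pref a
      ∧ pvRank base pref a < (base.length : Int) + (pref.length : Int) := by
    intro a ha
    rw [hrSP a ha]
    have := List.idxOf_lt_length_of_mem ((hSP a).mp ha).1
    constructor
    · have : (0 : Int) ≤ (pref.idxOf a : Int) := Int.natCast_nonneg _
      omega
    · have : (pref.idxOf a : Int) < (pref.length : Int) := by exact_mod_cast this
      omega
  have hbSR : ∀ a ∈ SR, (base.length : Int) + (pref.length : Int) ≤ pvRank base pref a := by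
    intro a ha
    rw [hrSR a ha]
    have : (0 : Int) ≤ (base.idxOf a : Int) := Int.natCast_nonneg _
    omega
  apply PySem.List.sorted_eq_of_perm_of_pairwise_lt
  · -- permutation: both are the distinct elements of base_order
    refine (List.perm_ext_iff_of_nodup ?_ (by
        rw [PySem.List.dedup_eq_ofList]; exact PySem.Set.nodup_ofList base)).mpr ?_
    · rw [List.nodup_append, List.nodup_append]
      refine ⟨⟨nodup_dedupF _, nodup_dedupF _, ?_⟩, nodup_dedupF _, ?_⟩
      · intro a ha b hb h
        subst h
        have h1 := ((hNS a).mp ha).2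
        have h2 := ((hSP a).mp hb).2.2
        rw [h1] at h2
        exact Bool.false_ne_true h2
      · intro a ha b hb h
        subst h
        rcases List.mem_append.mp ha with ha | ha
        · have h1 := ((hNS a).mp ha).2
          have h2 := ((hSR a).mp hb).2.1
          rw [h1] at h2
          exact Bool.false_ne_true h2
        · exact ((hSR a).mp hb).2.2 ((hSP a).mp ha).1
    · intro a
      rw [PySem.List.mem_dedup, List.mem_append, List.mem_append, hNS a, hSP a, hSR a]
      by_cases hb : a ∈ base <;> cases hs : pvSpecials.contains a <;>
        by_cases hp : a ∈ pref <;> simp [hb, hs, hp]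
  · -- strictly increasing rank along NS ++ SP ++ SR
    rw [List.pairwise_append]
    refine ⟨?_, ?_, ?_⟩
    · rw [List.pairwise_append]
      refine ⟨?_, ?_, ?_⟩
      · refine (dedupF_filter_pairwise base _).imp_of_mem ?_
        intro a b ha hb hab
        rw [hrNS a ha, hrNS b hb]
        exact_mod_cast hab
      · refine (dedupF_filter_pairwise pref _).imp_of_mem ?_
        intro a b ha hb hab
        rw [hrSP a ha, hrSP b hb]
        have : (pref.idxOf a : Int) < (pref.idxOf b : Int) := by exact_mod_cast hab
        omega
      · intro a ha b hb
        have h1 := hbNS a ha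
        have h2 := (hbSP b hb).1
        omega
    · refine (dedupF_filter_pairwise base _).imp_of_mem ?_
      intro a b ha hb hab
      rw [hrSR a ha, hrSR b hb]
      have : (base.idxOf a : Int) < (base.idxOf b : Int) := by exact_mod_cast hab
      omega
    · intro a ha b hb
      have h2 := hbSR b hb
      rcases List.mem_append.mp ha with ha | ha
      · have h1 := hbNS a ha
        have : (0 : Int) ≤ (pref.length : Int) := Int.natCast_nonneg _
        omega
      · have h1 := (hbSP a ha).2
        omega

-- ===== VERDICT (by name: the statement is the Claim_ definition above) =====
theorem ordered_sections_py_spec : Claim_equal_ordered_sections_py := by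
  intro base pref _
  unfold Spec_ordered_sections_py
  have hA : ordered_sections_py base pref
      = pvD []
          ((base.filter fun x => !(pvSpecials.contains x)) ++
            base.foldl (fun t x =>
              if !((base.filter fun y => !(pvSpecials.contains y)).contains x)
                  && !(t.contains x)
              then t ++ [x] else t)
              (pref.filter fun x => base.contains x)) := rfl
  rw [hA, a_side (fun x => pvSpecials.contains x) base pref, b_side]
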